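-- pv_equiv track=rewrite | github.com/iwangjian/Color4Dial | eval/eval_dialog_tgconv.py | get_eval_response
-- ===== SOURCE A (Python) =====
-- def get_eval_response(idx, eval_samples, gold_samples):
--     eval_list = [eval_samples[idx]["response"]]
--     dialog_id = gold_samples[idx]["id"]
--     j = 1
--     while j < 8:
--         # eval within 8 turns
--         if idx - j >= 0 and gold_samples[idx-1]["id"] == dialog_id:
--             eval_list.append(eval_samples[idx-1]["response"])
--             j += 1
--         else:
--             break
--     return eval_list
-- ===== SOURCE B (Python) =====
-- def get_eval_response(idx, eval_samples, gold_samples):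
--     # Recursive decomposition: the history suffix of the answer is built by a
--     # recursive helper that walks the turn counter j = 1..7 and prepends one
--     # copy of the previous response per step, instead of A's while loop that
--     # mutates an accumulator list.
--     def history(j):
--         if j >= 8:
--             return []
--         if idx - j < 0 or gold_samples[idx - 1]["id"] != gold_samples[idx]["id"]:
--             return []
--         return [eval_samples[idx - 1]["response"]] + history(j + 1)
--     return [eval_samples[idx]["response"]] + history(1)
-- ===== Notes on version B (the rewrite author's own statement) =====
-- stated objective: alternative
-- what changed: Replaces A's imperative while loop that mutates an accumulator list with a pure recursive helper that builds the history suffix front-to-back and is concatenated to the head response.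
import Mathlib
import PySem

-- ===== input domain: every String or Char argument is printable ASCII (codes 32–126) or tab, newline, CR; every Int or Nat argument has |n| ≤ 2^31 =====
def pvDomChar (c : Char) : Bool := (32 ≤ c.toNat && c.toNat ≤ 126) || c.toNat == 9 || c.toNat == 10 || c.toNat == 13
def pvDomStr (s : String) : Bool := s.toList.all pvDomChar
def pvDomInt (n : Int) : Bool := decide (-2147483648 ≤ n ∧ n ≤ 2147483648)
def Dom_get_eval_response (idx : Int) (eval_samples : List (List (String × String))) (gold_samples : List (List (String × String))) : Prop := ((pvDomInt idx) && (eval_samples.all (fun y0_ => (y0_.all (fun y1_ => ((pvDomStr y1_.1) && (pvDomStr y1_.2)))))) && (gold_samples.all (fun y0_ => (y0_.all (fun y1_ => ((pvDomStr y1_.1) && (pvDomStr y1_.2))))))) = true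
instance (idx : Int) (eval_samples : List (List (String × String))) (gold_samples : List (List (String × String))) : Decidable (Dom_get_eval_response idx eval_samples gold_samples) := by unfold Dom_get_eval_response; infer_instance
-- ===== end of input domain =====

-- B replaces A's while loop that mutates an accumulator list by a pure recursive helper
-- building the history suffix front-to-back; objective: alternative decomposition.

-- ===== PORT A =====
-- d[k] for an association-list dict: first match (Pre_ guarantees the key is present where accessed)
def pvDictGet (d : List (String × String)) (k : String) : Option String :=
  (d.find? (fun p => p.1 == k)).map (·.2)

-- xs[i]["key"], defaulted (Pre_ guarantees the accesses the Pythons perform are in range / present)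
def pvField (xs : List (List (String × String))) (i : Int) (k : String) : String :=
  (pvDictGet ((PySem.List.pyGet? xs i).getD []) k).getD ""

-- A's while loop: fuel = remaining iterations (j runs 1..7), acc = eval_list so far
def pvLoopA (idx : Int) (eval_samples gold_samples : List (List (String × String)))
    (dialog_id : String) : Nat → Int → List String → List String
  | 0, _, acc => acc
  | fuel + 1, j, acc =>
      if idx - j ≥ 0 ∧ pvField gold_samples (idx - 1) "id" = dialog_id then
        pvLoopA idx eval_samples gold_samples dialog_id fuel (j + 1)
          (acc ++ [pvField eval_samples (idx - 1) "response"])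
      else acc

def get_eval_response (idx : Int) (eval_samples : List (List (String × String))) (gold_samples : List (List (String × String))) : List String :=
  let eval_list := [pvField eval_samples idx "response"]
  let dialog_id := pvField gold_samples idx "id"
  pvLoopA idx eval_samples gold_samples dialog_id 7 1 eval_list

-- ===== PORT B =====
-- B's recursive helper 'history': prepends one previous response per step j = 1..7
def pvHistoryB (idx : Int) (eval_samples gold_samples : List (List (String × String)))
    (j : Nat) : List String :=
  if _h : j ≥ 8 then []
  else if idx - j < 0 ∨ pvField gold_samples (idx - 1) "id" ≠ pvField gold_samples idx "id" then []
  else pvField eval_samples (idx - 1) "response" :: pvHistoryB idx eval_samples gold_samples (j + 1)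
termination_by 8 - j

def get_eval_response_alt (idx : Int) (eval_samples : List (List (String × String))) (gold_samples : List (List (String × String))) : List String :=
  [pvField eval_samples idx "response"] ++ pvHistoryB idx eval_samples gold_samples 1

-- ===== PRECONDITION & SPEC =====
-- Pre_ excludes exactly the inputs where Python A raises: idx out of range for either list,
-- a sample missing its "response"/"id" key, or (when the loop's condition is reached) the
-- previous gold/eval samples out of range or missing their key.
def pvHasKey (xs : List (List (String × String))) (i : Int) (k : String) : Bool :=
  match PySem.List.pyGet? xs i with
  | none => false
  | some d => (pvDictGet d k).isSome

def Pre_get_eval_response (idx : Int) (eval_samples : List (List (String × String))) (gold_samples : List (List (String × String))) : Prop :=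
  pvHasKey eval_samples idx "response" = true ∧ pvHasKey gold_samples idx "id" = true ∧
    (1 ≤ idx → pvHasKey gold_samples (idx - 1) "id" = true ∧
      (pvField gold_samples (idx - 1) "id" = pvField gold_samples idx "id" →
        pvHasKey eval_samples (idx - 1) "response" = true))

instance (idx : Int) (eval_samples : List (List (String × String))) (gold_samples : List (List (String × String))) : Decidable (Pre_get_eval_response idx eval_samples gold_samples) := by unfold Pre_get_eval_response; infer_instance

def pvWitness_get_eval_response : Int × (List (List (String × String))) × (List (List (String × String))) :=
  (1, [[("response", "hi")], [("response", "lo")]], [[("id", "d1")], [("id", "d1")]])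

def Spec_get_eval_response (idx : Int) (eval_samples : List (List (String × String))) (gold_samples : List (List (String × String))) (out : List String) : Prop := out = get_eval_response_alt idx eval_samples gold_samples
instance (idx : Int) (eval_samples : List (List (String × String))) (gold_samples : List (List (String × String))) (out : List String) : Decidable (Spec_get_eval_response idx eval_samples gold_samples out) := by unfold Spec_get_eval_response; infer_instance

-- ===== CLAIM (what is proved, stated in full; the proofs are below) =====
def Claim_equal_get_eval_response : Prop := ∀ (idx : Int) (eval_samples : List (List (String × String))) (gold_samples : List (List (String × String))), Dom_get_eval_response idx eval_samples gold_samples → Pre_get_eval_response idx eval_samples gold_samples → Spec_get_eval_response idx eval_samples gold_samples (get_eval_response idx eval_samples gold_samples)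

-- ===== LEMMAS AND PROOFS =====

-- A's loop at fuel = 8 - j appends, to its accumulator, exactly what B's helper
-- produces from step j (induction on the remaining fuel).
theorem pvLoopA_eq_history (idx : Int) (es gs : List (List (String × String))) :
    ∀ (fuel j : Nat), fuel + j = 8 →
      ∀ acc : List String,
        pvLoopA idx es gs (pvField gs idx "id") fuel (j : Int) acc
          = acc ++ pvHistoryB idx es gs j := by
  intro fuel
  induction fuel with
  | zero =>
    intro j hj acc
    have : j = 8 := by omega
    subst this
    simp [pvLoopA, pvHistoryB]
  | succ n ih =>
    intro j hj acc
    rw [pvLoopA, pvHistoryB]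
    by_cases hc : idx - (j : Int) ≥ 0 ∧ pvField gs (idx - 1) "id" = pvField gs idx "id"
    · rw [if_pos hc, dif_neg (by omega),
        if_neg (by push Not; exact ⟨by omega, hc.2⟩)]
      have := ih (j + 1) (by omega) (acc ++ [pvField es (idx - 1) "response"])
      push_cast at this ⊢
      rw [this, List.append_assoc]
      rfl
    · rw [if_neg hc, dif_neg (by omega)]
      rw [if_pos (by by_cases h1 : idx - (j : Int) ≥ 0
                     · right; intro he; exact hc ⟨h1, he⟩
                     · left; omega)]
      simp

-- ===== VERDICT (by name: the statement is the Claim_ definition above) =====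
theorem get_eval_response_spec : Claim_equal_get_eval_response := by
  intro idx es gs _ _
  unfold Spec_get_eval_response get_eval_response get_eval_response_alt
  exact pvLoopA_eq_history idx es gs 7 1 (by omega) _
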